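-- pv_equiv track=rewrite | github.com/authenciat/hybrid-codes | output_analysis.py | commute_check
-- ===== SOURCE A (Python) =====
-- def commute_check(op1, op2):
--     """Check if two Pauli operators commute"""
--     if len(op1) != len(op2):
--         raise ValueError("Operators must be same length")
--
--     # Count number of positions where one operator is X/Y and other is Y/Z
--     anticommuting_positions = 0
--     for p1, p2 in zip(op1, op2):
--         # Two operators anticommute at a position if:
--         # - One is X and other is Z
--         # - One is Y and other is X or Z
--         if (p1 in 'XY' and p2 == 'Z') or (p1 == 'Z' and p2 in 'XY') or \
--            (p1 == 'Y' and p2 == 'X') or (p1 == 'X' and p2 == 'Y'):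
--             anticommuting_positions += 1
--
--     # Operators commute if they anticommute at an even number of positions
--     return anticommuting_positions % 2 == 0
-- ===== SOURCE B (Python) =====
-- _SYMPLECTIC = {'X': (1, 0), 'Y': (1, 1), 'Z': (0, 1)}
--
-- def commute_check(op1, op2):
--     """Check if two Pauli operators commute (symplectic bitmask formulation)"""
--     if len(op1) != len(op2):
--         raise ValueError("Operators must be same length")
--     x1 = z1 = x2 = z2 = 0
--     for i, (a, b) in enumerate(zip(op1, op2)):
--         ax, az = _SYMPLECTIC.get(a, (0, 0))
--         bx, bz = _SYMPLECTIC.get(b, (0, 0))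
--         x1 |= ax << i
--         z1 |= az << i
--         x2 |= bx << i
--         z2 |= bz << i
--     return bin((x1 & z2) ^ (z1 & x2)).count("1") % 2 == 0
-- ===== Notes on version B (the rewrite author's own statement) =====
-- stated objective: alternative
-- what changed: Replaces the per-position four-way letter-case anticommutation test and counter with the symplectic representation: each operator is packed into x/z bitmask integers and commutation is read off as the parity of popcount((x1&z2)^(z1&x2)).
import Mathlib
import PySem

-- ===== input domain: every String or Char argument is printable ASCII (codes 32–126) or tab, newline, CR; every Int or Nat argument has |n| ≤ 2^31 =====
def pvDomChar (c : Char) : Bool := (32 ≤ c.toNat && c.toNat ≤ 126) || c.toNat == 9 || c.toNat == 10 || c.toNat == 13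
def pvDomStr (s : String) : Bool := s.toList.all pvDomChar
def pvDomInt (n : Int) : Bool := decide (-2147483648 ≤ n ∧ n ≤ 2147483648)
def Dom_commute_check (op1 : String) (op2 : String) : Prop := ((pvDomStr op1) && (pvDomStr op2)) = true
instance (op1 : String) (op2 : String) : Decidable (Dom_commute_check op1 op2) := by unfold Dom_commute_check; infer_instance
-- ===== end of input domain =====

-- B recasts the per-position letter-case analysis as the symplectic bitmask inner product
-- popcount((x1&z2)^(z1&x2)) mod 2 (objective: alternative; return value only, equal cost).

-- ===== PORT A =====
-- the anticommutation test of A's loop body ('p1 in "XY"' is char-in-string membership, exact here)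
def pvAnti (p : Char × Char) : Bool :=
  ((p.1 == 'X' || p.1 == 'Y') && p.2 == 'Z') || (p.1 == 'Z' && (p.2 == 'X' || p.2 == 'Y')) ||
  (p.1 == 'Y' && p.2 == 'X') || (p.1 == 'X' && p.2 == 'Y')

-- the ValueError branch (len(op1) != len(op2)) is excluded by Pre_commute_check
def commute_check (op1 : String) (op2 : String) : Bool :=
  ((op1.toList.zip op2.toList).foldl (fun acc p => if pvAnti p then acc + 1 else acc) 0) % 2 == 0

-- ===== PORT B =====
-- _SYMPLECTIC.get(c, (0, 0))
def pvSym (c : Char) : Nat × Nat :=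
  if c == 'X' then (1, 0) else if c == 'Y' then (1, 1) else if c == 'Z' then (0, 1) else (0, 0)

-- one iteration of Source B's loop; state = (x1, z1, x2, z2, i)
def pvStep (st : Nat × Nat × Nat × Nat × Nat) (p : Char × Char) : Nat × Nat × Nat × Nat × Nat :=
  (st.1 ||| (pvSym p.1).1 <<< st.2.2.2.2,
   st.2.1 ||| (pvSym p.1).2 <<< st.2.2.2.2,
   st.2.2.1 ||| (pvSym p.2).1 <<< st.2.2.2.2,
   st.2.2.2.1 ||| (pvSym p.2).2 <<< st.2.2.2.2,
   st.2.2.2.2 + 1)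

-- bin(n).count("1")
def pvPopcnt (n : Nat) : Nat :=
  if h : n = 0 then 0 else n % 2 + pvPopcnt (n / 2)
decreasing_by exact Nat.div_lt_self (Nat.pos_of_ne_zero h) (by norm_num)

-- (x1 & z2) ^ (z1 & x2) from the final state (x1, z1, x2, z2, _)
def pvSymProd (r : Nat × Nat × Nat × Nat × Nat) : Nat :=
  (r.1 &&& r.2.2.2.1) ^^^ (r.2.1 &&& r.2.2.1)

-- the ValueError branch is excluded by Pre_commute_check
def commute_check_alt (op1 : String) (op2 : String) : Bool :=
  pvPopcnt (pvSymProd ((op1.toList.zip op2.toList).foldl pvStep (0, 0, 0, 0, 0))) % 2 == 0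

-- ===== PRECONDITION & SPEC =====
-- Pre_ excludes exactly the inputs of unequal length, where A (and B) raise ValueError
def Pre_commute_check (op1 : String) (op2 : String) : Prop := op1.length = op2.length
instance (op1 : String) (op2 : String) : Decidable (Pre_commute_check op1 op2) := by
  unfold Pre_commute_check; infer_instance
def pvWitness_commute_check : String × String := ("XZY", "ZXI")
def Spec_commute_check (op1 : String) (op2 : String) (out : Bool) : Prop := out = commute_check_alt op1 op2
instance (op1 : String) (op2 : String) (out : Bool) : Decidable (Spec_commute_check op1 op2 out) := by
  unfold Spec_commute_check; infer_instance

-- ===== CLAIM (what is proved, stated in full; the proofs are below) =====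
def Claim_equal_commute_check : Prop := ∀ (op1 : String) (op2 : String), Dom_commute_check op1 op2 → Pre_commute_check op1 op2 → Spec_commute_check op1 op2 (commute_check op1 op2)

-- ===== LEMMAS AND PROOFS =====

theorem pv_sym_le (c : Char) : (pvSym c).1 ≤ 1 ∧ (pvSym c).2 ≤ 1 := by
  unfold pvSym; split_ifs <;> simp

-- per position, the symplectic product is 1 exactly on A's anticommuting cases
theorem pv_bitval (p : Char × Char) :
    ((pvSym p.1).1 &&& (pvSym p.2).2) ^^^ ((pvSym p.1).2 &&& (pvSym p.2).1)
      = if pvAnti p then 1 else 0 := by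
  obtain ⟨a, b⟩ := p
  unfold pvSym pvAnti
  by_cases h1 : a = 'X' <;> by_cases h2 : a = 'Y' <;> by_cases h3 : a = 'Z' <;>
    by_cases h4 : b = 'X' <;> by_cases h5 : b = 'Y' <;> by_cases h6 : b = 'Z' <;>
    simp_all

theorem pv_count_fold (l : List (Char × Char)) (acc : Nat) :
    l.foldl (fun acc p => if pvAnti p then acc + 1 else acc) acc = acc + l.countP pvAnti := by
  induction l generalizing acc with
  | nil => simp
  | cons p l ih =>
    simp only [List.foldl_cons, List.countP_cons, ih]
    split_ifs <;> omega

theorem pv_or_shift {x i : Nat} (a : Nat) (hx : x < 2 ^ i) :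
    x ||| a <<< i = x + a * 2 ^ i := by
  have h := Nat.shiftLeft_add_eq_or_of_lt hx a
  rw [Nat.or_comm, ← h, Nat.shiftLeft_eq]; omega

theorem pv_and_split {x y a b i : Nat} (hx : x < 2 ^ i) (hy : y < 2 ^ i) :
    (x + a * 2 ^ i) &&& (y + b * 2 ^ i) = (x &&& y) + (a &&& b) * 2 ^ i := by
  rw [← pv_or_shift a hx, ← pv_or_shift b hy,
      ← pv_or_shift (a &&& b) (Nat.and_lt_two_pow x hy)]
  apply Nat.eq_of_testBit_eq
  intro j
  by_cases hij : i ≤ j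
  · have hxj : x.testBit j = false :=
      Nat.testBit_lt_two_pow (lt_of_lt_of_le hx (Nat.pow_le_pow_right (by norm_num) hij))
    have hyj : y.testBit j = false :=
      Nat.testBit_lt_two_pow (lt_of_lt_of_le hy (Nat.pow_le_pow_right (by norm_num) hij))
    simp [Nat.testBit_or, Nat.testBit_and, Nat.testBit_shiftLeft, hij, hxj, hyj]
  · simp [Nat.testBit_or, Nat.testBit_and, Nat.testBit_shiftLeft, hij]

theorem pv_xor_split {x y a b i : Nat} (hx : x < 2 ^ i) (hy : y < 2 ^ i) :
    (x + a * 2 ^ i) ^^^ (y + b * 2 ^ i) = (x ^^^ y) + (a ^^^ b) * 2 ^ i := by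
  rw [← pv_or_shift a hx, ← pv_or_shift b hy,
      ← pv_or_shift (a ^^^ b) (Nat.xor_lt_two_pow hx hy)]
  apply Nat.eq_of_testBit_eq
  intro j
  by_cases hij : i ≤ j
  · have hxj : x.testBit j = false :=
      Nat.testBit_lt_two_pow (lt_of_lt_of_le hx (Nat.pow_le_pow_right (by norm_num) hij))
    have hyj : y.testBit j = false :=
      Nat.testBit_lt_two_pow (lt_of_lt_of_le hy (Nat.pow_le_pow_right (by norm_num) hij))
    simp [Nat.testBit_or, Nat.testBit_xor, Nat.testBit_shiftLeft, hij, hxj, hyj]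
  · simp [Nat.testBit_or, Nat.testBit_xor, Nat.testBit_shiftLeft, hij]

theorem pv_popcnt_step (n : Nat) : pvPopcnt n = n % 2 + pvPopcnt (n / 2) := by
  by_cases h : n = 0
  · subst h; simp [pvPopcnt]
  · rw [pvPopcnt]; simp [h]

theorem pv_popcnt_add {m a : Nat} (i : Nat) (hm : m < 2 ^ i) (ha : a ≤ 1) :
    pvPopcnt (m + a * 2 ^ i) = pvPopcnt m + a := by
  induction i generalizing m with
  | zero =>
    interval_cases m
    interval_cases a <;> simp [pvPopcnt]
  | succ i ih =>
    have hp : 2 ^ (i + 1) = 2 ^ i * 2 := pow_succ 2 i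
    rw [pv_popcnt_step (m + a * 2 ^ (i + 1)), pv_popcnt_step m]
    have h1 : (m + a * 2 ^ (i + 1)) % 2 = m % 2 := by
      rw [hp, ← Nat.mul_assoc, Nat.add_mul_mod_self_right]
    have h2 : (m + a * 2 ^ (i + 1)) / 2 = m / 2 + a * 2 ^ i := by
      rw [hp, ← Nat.mul_assoc, Nat.add_mul_div_right _ _ (by norm_num)]
    have h3 : m / 2 < 2 ^ i := by
      rw [Nat.div_lt_iff_lt_mul (by norm_num)]; omega
    rw [h1, h2, ih h3]
    omega

theorem pv_bound {x a i : Nat} (hx : x < 2 ^ i) (ha : a ≤ 1) : x + a * 2 ^ i < 2 ^ (i + 1) := by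
  have hp : 2 ^ (i + 1) = 2 ^ i * 2 := pow_succ 2 i
  have hm : a * 2 ^ i ≤ 1 * 2 ^ i := Nat.mul_le_mul_right _ ha
  omega

theorem pv_loop_inv (l : List (Char × Char)) (x1 z1 x2 z2 i : Nat)
    (h1 : x1 < 2 ^ i) (h2 : z1 < 2 ^ i) (h3 : x2 < 2 ^ i) (h4 : z2 < 2 ^ i) :
    pvPopcnt (pvSymProd (l.foldl pvStep (x1, z1, x2, z2, i)))
      = pvPopcnt ((x1 &&& z2) ^^^ (z1 &&& x2)) + l.countP pvAnti := by
  induction l generalizing x1 z1 x2 z2 i with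
  | nil => simp [pvSymProd]
  | cons p l ih =>
    simp only [List.foldl_cons, List.countP_cons]
    obtain ⟨hax, haz⟩ := pv_sym_le p.1
    obtain ⟨hbx, hbz⟩ := pv_sym_le p.2
    have step_eq : pvStep (x1, z1, x2, z2, i) p =
        (x1 + (pvSym p.1).1 * 2 ^ i, z1 + (pvSym p.1).2 * 2 ^ i,
         x2 + (pvSym p.2).1 * 2 ^ i, z2 + (pvSym p.2).2 * 2 ^ i, i + 1) := by
      simp only [pvStep, pv_or_shift _ h1, pv_or_shift _ h2, pv_or_shift _ h3, pv_or_shift _ h4]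
    rw [step_eq, ih _ _ _ _ (i + 1) (pv_bound h1 hax) (pv_bound h2 haz)
      (pv_bound h3 hbx) (pv_bound h4 hbz)]
    rw [pv_and_split h1 h4, pv_and_split h2 h3, pv_xor_split (Nat.and_lt_two_pow x1 h4) (Nat.and_lt_two_pow z1 h3)]
    have h21 : (2 : Nat) ^ 1 = 2 := by norm_num
    have hc : ((pvSym p.1).1 &&& (pvSym p.2).2) ^^^ ((pvSym p.1).2 &&& (pvSym p.2).1) ≤ 1 := by
      have := Nat.xor_lt_two_pow (x := (pvSym p.1).1 &&& (pvSym p.2).2)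
        (y := (pvSym p.1).2 &&& (pvSym p.2).1) (n := 1)
        (Nat.and_lt_two_pow _ (by omega)) (Nat.and_lt_two_pow _ (by omega))
      omega
    rw [pv_popcnt_add i (Nat.xor_lt_two_pow (Nat.and_lt_two_pow x1 h4) (Nat.and_lt_two_pow z1 h3)) hc]
    rw [pv_bitval p]
    split_ifs <;> omega

-- ===== VERDICT (by name: the statement is the Claim_ definition above) =====
theorem commute_check_spec : Claim_equal_commute_check := by
  unfold Claim_equal_commute_check
  intro op1 op2 _ _
  unfold Spec_commute_check commute_check commute_check_alt
  have hinv := pv_loop_inv (op1.toList.zip op2.toList) 0 0 0 0 0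
    (by norm_num) (by norm_num) (by norm_num) (by norm_num)
  rw [hinv, pv_count_fold]
  have h0 : pvPopcnt ((0 &&& 0) ^^^ (0 &&& 0)) = 0 := by simp [pvPopcnt]
  rw [h0]
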